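-- pv_equiv track=rewrite | github.com/inclusionAI/AWorld | aworld-cli/src/aworld_cli/builtin_plugins/memory_cli/commands/memory.py | _source_ref_summary
-- ===== SOURCE A (Python) =====
-- def _source_ref_summary(value) -> str:
--     if not isinstance(value, dict) or not value:
--         return "none"
--     ordered_keys = ("session_id", "task_id", "candidate_id")
--     parts: list[str] = []
--     for key in ordered_keys:
--         if key in value:
--             parts.append(f"{key}={value[key]}")
--     for key in sorted(value):
--         if key not in ordered_keys:
--             parts.append(f"{key}={value[key]}")
--     return ", ".join(parts) if parts else "none"
-- ===== SOURCE B (Python) =====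
-- def _source_ref_summary(value) -> str:
--     if not isinstance(value, dict) or not value:
--         return "none"
--     ordered_keys = ("session_id", "task_id", "candidate_id")
--     rank = {k: i for i, k in enumerate(ordered_keys)}
--     keys = sorted(value, key=lambda k: (rank.get(k, len(ordered_keys)), k))
--     return ", ".join(f"{k}={value[k]}" for k in keys)
-- ===== Notes on version B (the rewrite author's own statement) =====
-- stated objective: simpler
-- what changed: Replaces A's two passes (fixed-order priority loop plus a sorted-remainder loop with membership filtering) by one keyed sort over all keys using a rank dict, then a single join.
import Mathlib
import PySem

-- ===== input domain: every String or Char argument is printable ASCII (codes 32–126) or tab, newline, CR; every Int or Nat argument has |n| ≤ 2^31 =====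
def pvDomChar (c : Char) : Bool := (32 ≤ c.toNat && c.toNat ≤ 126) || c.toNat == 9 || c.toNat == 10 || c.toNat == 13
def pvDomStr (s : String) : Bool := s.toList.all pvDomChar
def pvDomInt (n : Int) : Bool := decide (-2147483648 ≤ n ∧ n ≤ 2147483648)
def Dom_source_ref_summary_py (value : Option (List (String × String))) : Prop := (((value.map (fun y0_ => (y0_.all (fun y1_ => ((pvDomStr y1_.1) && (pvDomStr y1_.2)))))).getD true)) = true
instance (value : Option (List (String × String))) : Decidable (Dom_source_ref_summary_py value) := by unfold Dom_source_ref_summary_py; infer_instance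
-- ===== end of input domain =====

-- B replaces A's two passes (fixed-order priority loop + sorted-remainder loop) by one keyed
-- sort of all keys using a rank dict, then a single join; objective: simpler, not faster.

-- ===== PORT A =====
-- literal transliteration of A; the dict argument is an association list (None → none),
-- decoded into a PySem.Dict exactly as Python builds the dict
def source_ref_summary_py (value : Option (List (String × String))) : String :=
  match value with
  | none => "none"
  | some lst =>
    let d : PySem.Dict String String := PySem.Dict.ofList lst
    if d.items = [] then "none"
    else
      let ordered_keys : List String := ["session_id", "task_id", "candidate_id"]
      let parts : List String := ordered_keys.foldl
        (fun ps k => if d.contains k then ps ++ [k ++ "=" ++ d.getD k ""] else ps) []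
      let parts := (PySem.List.sorted d.keys (fun k => k)).foldl
        (fun ps k => if ordered_keys.contains k then ps else ps ++ [k ++ "=" ++ d.getD k ""]) parts
      if parts = [] then "none" else PySem.Str.join ", " parts

-- ===== PORT B =====
-- literal transliteration of Source B: rank dict from enumerate, one keyed sort, one join
def source_ref_summary_py_alt (value : Option (List (String × String))) : String :=
  match value with
  | none => "none"
  | some lst =>
    let d : PySem.Dict String String := PySem.Dict.ofList lst
    if d.items = [] then "none"
    else
      let ordered_keys : List String := ["session_id", "task_id", "candidate_id"]
      let rank : PySem.Dict String Int :=
        (PySem.List.enumerate ordered_keys).foldl (fun r p => r.insert p.2 p.1) PySem.Dict.empty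
      let keys := PySem.List.sorted2 d.keys
        (fun k => rank.getD k (ordered_keys.length : Int)) (fun k => k)
      PySem.Str.join ", " (keys.map (fun k => k ++ "=" ++ d.getD k ""))

-- ===== PRECONDITION & SPEC =====
def Spec_source_ref_summary_py (value : Option (List (String × String))) (out : String) : Prop := out = source_ref_summary_py_alt value
instance (value : Option (List (String × String))) (out : String) : Decidable (Spec_source_ref_summary_py value out) := by unfold Spec_source_ref_summary_py; infer_instance

-- ===== CLAIM (what is proved, stated in full; the proofs are below) =====
def Claim_equal_source_ref_summary_py : Prop := ∀ (value : Option (List (String × String))), Dom_source_ref_summary_py value → Spec_source_ref_summary_py value (source_ref_summary_py value)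

-- ===== LEMMAS AND PROOFS =====

-- the rank dict B's fold builds, as a literal
def pvRank : PySem.Dict String Int :=
  PySem.Dict.mk [("session_id", 0), ("task_id", 1), ("candidate_id", 2)]

lemma pvRank_fold :
    (PySem.List.enumerate ["session_id", "task_id", "candidate_id"]).foldl
      (fun r p => r.insert p.2 p.1) PySem.Dict.empty = pvRank := by rfl

-- sorted with a (k1, k2) tuple key is sorted with the lexicographic key
lemma sorted2_eq_sorted_lex {α : Type} (xs : List α) (k1 : α → Int) (k2 : α → String) :
    PySem.List.sorted2 xs k1 k2
      = PySem.List.sorted xs (fun x => toLex (k1 x, k2 x)) := by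
  have hb : (fun a b : α => decide (k1 a < k1 b) || (!decide (k1 b < k1 a) && decide (k2 a < k2 b)))
      = (fun a b : α => decide (toLex (k1 a, k2 a) < toLex (k1 b, k2 b))) := by
    funext a b
    rcases lt_trichotomy (k1 a) (k1 b) with h | h | h
    · simp [Prod.Lex.lt_iff, h]
    · simp [Prod.Lex.lt_iff, h]
    · simp [Prod.Lex.lt_iff, h, asymm h, ne_of_gt h]
  unfold PySem.List.sorted2 PySem.List.sorted
  simp only [Bool.false_eq_true, if_false]
  rw [hb]

lemma rank_lt_three (a : String) (ha : a ∈ ["session_id", "task_id", "candidate_id"]) :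
    pvRank.getD a 3 < 3 := by
  simp only [List.mem_cons, List.not_mem_nil, or_false] at ha
  rcases ha with h | h | h <;> (rw [h]; decide)

lemma rank_eq_three (b : String) (hb : b ∉ ["session_id", "task_id", "candidate_id"]) :
    pvRank.getD b 3 = 3 := by
  simp only [List.mem_cons, List.not_mem_nil, or_false, not_or] at hb
  obtain ⟨h1, h2, h3⟩ := hb
  simp [pvRank, PySem.Dict.getD_eq_get?_getD, PySem.Dict.get?,
    Ne.symm h1, Ne.symm h2, Ne.symm h3]

-- THE key ordering fact: A's (priority pass ++ sorted remainder) is B's single keyed sort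
lemma key_order (d : PySem.Dict String String) (hnd : d.keys.Nodup) :
    (["session_id", "task_id", "candidate_id"].filter (fun k => d.contains k))
      ++ ((PySem.List.sorted d.keys (fun k => k)).filter
            (fun k => !(["session_id", "task_id", "candidate_id"].contains k)))
    = PySem.List.sorted2 d.keys (fun k => pvRank.getD k 3) (fun k => k) := by
  rw [sorted2_eq_sorted_lex]
  have hn1 : (["session_id", "task_id", "candidate_id"].filter (fun k => d.contains k)).Nodup :=
    List.Nodup.filter _ (by decide)
  have hsn : (PySem.List.sorted d.keys (fun k => k)).Nodup :=
    (PySem.List.sorted_perm d.keys (fun k => k) false).symm.nodup hnd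
  have hn2 : ((PySem.List.sorted d.keys (fun k => k)).filter
      (fun k => !(["session_id", "task_id", "candidate_id"].contains k))).Nodup :=
    List.Nodup.filter _ hsn
  have hdisj : (["session_id", "task_id", "candidate_id"].filter (fun k => d.contains k)).Disjoint
      ((PySem.List.sorted d.keys (fun k => k)).filter
        (fun k => !(["session_id", "task_id", "candidate_id"].contains k))) := by
    intro a ha hb
    simp only [List.mem_filter, Bool.not_eq_eq_eq_not, Bool.not_true] at ha hb
    rw [List.contains_eq_mem] at hb
    exact absurd ha.1 (by simpa using hb.2)
  refine (PySem.List.sorted_eq_of_perm_of_pairwise_lt _ _ _ ?_ ?_).symm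
  · rw [List.perm_ext_iff_of_nodup (hn1.append hn2 hdisj) hnd]
    intro a
    simp only [List.mem_append, List.mem_filter, PySem.List.mem_sorted,
      PySem.Dict.contains_iff_mem_keys, List.contains_eq_mem, Bool.not_eq_eq_eq_not,
      Bool.not_true, decide_eq_false_iff_not]
    constructor
    · rintro (⟨_, h⟩ | ⟨h, _⟩) <;> exact h
    · intro h
      by_cases hm : a ∈ ["session_id", "task_id", "candidate_id"]
      · exact Or.inl ⟨hm, h⟩
      · exact Or.inr ⟨h, hm⟩
  · rw [List.pairwise_append]
    refine ⟨?_, ?_, ?_⟩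
    · exact List.Pairwise.sublist List.filter_sublist (by decide)
    · have hle : List.Pairwise (fun a b : String => a ≤ b)
          ((PySem.List.sorted d.keys (fun k => k)).filter
            (fun k => !(["session_id", "task_id", "candidate_id"].contains k))) :=
        List.Pairwise.sublist List.filter_sublist (PySem.List.sorted_pairwise d.keys (fun k => k))
      refine (hle.and hn2).imp_of_mem ?_
      intro a b ha hb h
      have hra : pvRank.getD a 3 = 3 := by
        refine rank_eq_three a ?_
        simp only [List.mem_filter, Bool.not_eq_eq_eq_not, Bool.not_true] at ha
        simpa [List.contains_eq_mem] using ha.2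
      have hrb : pvRank.getD b 3 = 3 := by
        refine rank_eq_three b ?_
        simp only [List.mem_filter, Bool.not_eq_eq_eq_not, Bool.not_true] at hb
        simpa [List.contains_eq_mem] using hb.2
      exact Prod.Lex.toLex_lt_toLex.mpr (Or.inr ⟨hra.trans hrb.symm, lt_of_le_of_ne h.1 h.2⟩)
    · intro a ha b hb
      have hra : pvRank.getD a 3 < 3 :=
        rank_lt_three a (List.mem_of_mem_filter ha)
      have hrb : pvRank.getD b 3 = 3 := by
        refine rank_eq_three b ?_
        simp only [List.mem_filter, Bool.not_eq_eq_eq_not, Bool.not_true] at hb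
        simpa [List.contains_eq_mem] using hb.2
      exact Prod.Lex.toLex_lt_toLex.mpr (Or.inl (by omega))

-- a 'for k in l: if p(k): pass else out.append(f(k))' loop
lemma foldl_append_ifnot {α β : Type} (p : α → Bool) (f : α → β) (l : List α) (acc : List β) :
    l.foldl (fun ps k => if p k then ps else ps ++ [f k]) acc
      = acc ++ (l.filter (fun k => !p k)).map f := by
  have h : (fun (ps : List β) k => if p k then ps else ps ++ [f k])
      = fun ps k => if !p k then ps ++ [f k] else ps := by
    funext ps k; cases p k <;> simp
  rw [h, PySem.List.foldl_append_if]

lemma ab_eq : ∀ (value : Option (List (String × String))),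
    source_ref_summary_py value = source_ref_summary_py_alt value := by
  intro value
  cases value with
  | none => rfl
  | some lst =>
    simp only [source_ref_summary_py, source_ref_summary_py_alt]
    set d : PySem.Dict String String := PySem.Dict.ofList lst with hd
    by_cases hemp : d.items = []
    · simp [hemp]
    · simp only [hemp, if_false, pvRank_fold]
      rw [PySem.List.foldl_append_if, foldl_append_ifnot, List.nil_append, ← List.map_append]
      have hnd : d.keys.Nodup := PySem.Dict.nodup_keys_ofList lst
      rw [show ((["session_id", "task_id", "candidate_id"] : List String).length : Int) = 3 from rfl]
      rw [key_order d hnd]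
      have hne : PySem.List.sorted2 d.keys (fun k => pvRank.getD k 3) (fun k => k) ≠ [] := by
        intro h
        have := (PySem.List.sorted2_perm d.keys (fun k => pvRank.getD k 3) (fun k => k) false).length_eq
        rw [h] at this
        have hk : d.keys = [] := List.eq_nil_of_length_eq_zero this.symm
        have hk' : d.items.map Prod.fst = [] := by simpa [PySem.Dict.keys] using hk
        exact hemp (List.map_eq_nil_iff.mp hk')
      rw [if_neg (fun h => hne (List.map_eq_nil_iff.mp h))]

-- ===== VERDICT (by name: the statement is the Claim_ definition above) =====
theorem source_ref_summary_py_spec : Claim_equal_source_ref_summary_py := by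
  intro value _dom
  unfold Spec_source_ref_summary_py
  exact ab_eq value
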